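-- pv_equiv track=rewrite | github.com/BolanosDavid/2-CN-uniovi | ExamenCN1.py | cambios_signo
-- ===== SOURCE A (Python) =====
-- def cambios_signo(p):
--     cont = 0
--     for i in range(0, len(p) - 1):
--         ceros = 0
--         while i + ceros + 1 < len(p) and p[i + ceros + 1] == 0:
--             ceros += 1
--         if i + ceros + 1 < len(p) and p[i] * p[i + ceros + 1] < 0:
--             cont += 1
--         i += ceros
--     return cont
-- ===== SOURCE B (Python) =====
-- def cambios_signo(p):
--     nz = [x for x in p if x != 0]
--     return sum(1 for a, b in zip(nz, nz[1:]) if a * b < 0)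
-- ===== Notes on version B (the rewrite author's own statement) =====
-- stated objective: alternative
-- what changed: Replaces the per-index rescan of zeros (a while loop inside the for loop) by filtering out zeros once and counting adjacent opposite-sign pairs in a single pass.
import Mathlib
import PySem

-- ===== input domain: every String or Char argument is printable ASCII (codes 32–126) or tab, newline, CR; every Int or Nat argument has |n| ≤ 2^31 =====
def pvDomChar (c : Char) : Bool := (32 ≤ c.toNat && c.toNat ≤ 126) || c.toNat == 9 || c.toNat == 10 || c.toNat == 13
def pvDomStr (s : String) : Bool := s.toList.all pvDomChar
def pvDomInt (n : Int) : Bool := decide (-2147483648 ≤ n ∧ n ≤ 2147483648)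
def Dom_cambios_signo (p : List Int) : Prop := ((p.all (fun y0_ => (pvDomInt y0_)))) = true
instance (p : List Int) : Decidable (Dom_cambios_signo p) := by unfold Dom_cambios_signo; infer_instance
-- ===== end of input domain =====

-- B replaces the per-index zero-rescan by a single pass: filter out zeros once, count adjacent opposite-sign pairs.

-- ===== PORT A =====
-- the inner `while i + ceros + 1 < len(p) and p[i+ceros+1] == 0: ceros += 1`
def cerosFrom (p : List Int) (i ceros : Nat) : Nat :=
  if h : i + ceros + 1 < p.length ∧ p.getD (i + ceros + 1) 0 = 0 then
    cerosFrom p i (ceros + 1)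
  else ceros
termination_by p.length - (i + ceros + 1)
decreasing_by omega

def cambios_signo (p : List Int) : Int :=
  (List.range (p.length - 1)).foldl
    (fun cont i =>
      let ceros := cerosFrom p i 0
      if i + ceros + 1 < p.length ∧ p.getD i 0 * p.getD (i + ceros + 1) 0 < 0 then
        cont + 1
      else cont) 0

-- ===== PORT B =====
-- sum(1 for a, b in zip(nz, nz[1:]) if a * b < 0)
def countAdj : List Int → Int
  | a :: b :: t => (if a * b < 0 then (1 : Int) else 0) + countAdj (b :: t)
  | _ => 0

def cambios_signo_alt (p : List Int) : Int :=
  countAdj (p.filter (fun x => x ≠ 0))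

-- ===== PRECONDITION & SPEC =====
def Spec_cambios_signo (p : List Int) (out : Int) : Prop := out = cambios_signo_alt p
instance (p : List Int) (out : Int) : Decidable (Spec_cambios_signo p out) := by unfold Spec_cambios_signo; infer_instance

-- ===== CLAIM (what is proved, stated in full; the proofs are below) =====
def Claim_equal_cambios_signo : Prop := ∀ (p : List Int), Dom_cambios_signo p → Spec_cambios_signo p (cambios_signo p)

-- ===== LEMMAS AND PROOFS =====

-- number of leading zeros of a list
def leadZeros : List Int → Nat
  | [] => 0
  | x :: t => if x = 0 then leadZeros t + 1 else 0

lemma cerosFrom_eq (p : List Int) (i c : Nat) :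
    cerosFrom p i c = c + leadZeros (p.drop (i + c + 1)) := by
  induction c using cerosFrom.induct (p := p) (i := i) with
  | case1 c h ih =>
    rw [cerosFrom, dif_pos h, ih, show i + (c + 1) + 1 = i + c + 1 + 1 from by omega]
    rw [List.drop_eq_getElem_cons h.1]
    have hz : p[i + c + 1] = 0 := by
      have := h.2; rwa [List.getD_eq_getElem _ _ h.1] at this
    simp [leadZeros, hz]
    omega
  | case2 c h =>
    rw [cerosFrom, dif_neg h]
    by_cases hlt : i + c + 1 < p.length
    · rw [List.drop_eq_getElem_cons hlt]
      have hz : ¬ p[i + c + 1] = 0 := by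
        intro hc; exact h ⟨hlt, by rw [List.getD_eq_getElem _ _ hlt, hc]⟩
      simp [leadZeros, hz]
    · rw [List.drop_eq_nil_of_le (by omega)]
      simp [leadZeros]

-- contribution of index i, in closed form
def contrib (p : List Int) (i : Nat) : Int :=
  let z := leadZeros (p.drop (i + 1))
  if i + z + 1 < p.length ∧ p.getD i 0 * p.getD (i + z + 1) 0 < 0 then 1 else 0

lemma foldl_count (p : List Int) (l : List Nat) (s : Int) :
    l.foldl (fun cont i =>
      let ceros := cerosFrom p i 0
      if i + ceros + 1 < p.length ∧ p.getD i 0 * p.getD (i + ceros + 1) 0 < 0 then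
        cont + 1
      else cont) s = s + (l.map (contrib p)).sum := by
  induction l generalizing s with
  | nil => simp
  | cons x t ih =>
    have hc : cerosFrom p x 0 = leadZeros (p.drop (x + 1)) := by
      rw [cerosFrom_eq]; simp
    simp only [List.foldl_cons, List.map_cons, List.sum_cons, ih, contrib, hc]
    split_ifs <;> ring

lemma contrib_shift (a : Int) (p : List Int) (i : Nat) :
    contrib (a :: p) (i + 1) = contrib p i := by
  simp only [contrib, List.drop_succ_cons]
  have e : i + 1 + leadZeros (p.drop (i + 1)) + 1 = (i + leadZeros (p.drop (i + 1)) + 1) + 1 := by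
    omega
  simp only [e, List.length_cons, List.getD_cons_succ, Nat.add_lt_add_iff_right]

lemma lead_spec (p : List Int) :
    (p.filter (fun x => x ≠ 0) = [] ∧ leadZeros p = p.length) ∨
    (∃ h t, p.filter (fun x => x ≠ 0) = h :: t ∧ leadZeros p < p.length ∧
      p.getD (leadZeros p) 0 = h) := by
  induction p with
  | nil => left; simp [leadZeros]
  | cons a t ih =>
    by_cases ha : a = 0
    · subst ha
      rcases ih with ⟨h1, h2⟩ | ⟨h, r, hf, hl, hg⟩
      · left
        refine ⟨by simpa using h1, ?_⟩
        simp [leadZeros, h2]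
      · right
        refine ⟨h, r, by simpa using hf, ?_, ?_⟩
        · simp [leadZeros]; omega
        · simpa [leadZeros] using hg
    · right
      exact ⟨a, t.filter (fun x => x ≠ 0), by simp [ha],
        by simp [leadZeros, ha], by simp [leadZeros, ha]⟩

lemma head_step (a : Int) (q : List Int) :
    contrib (a :: q) 0 + countAdj (q.filter (fun x => x ≠ 0)) =
      countAdj ((a :: q).filter (fun x => x ≠ 0)) := by
  rcases lead_spec q with ⟨hf, hl⟩ | ⟨h, r, hf, hl, hg⟩ <;>
    simp only [ne_eq, decide_not] at hf
  · have hc : contrib (a :: q) 0 = 0 := by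
      simp only [contrib, List.drop_succ_cons, List.drop_zero]
      rw [if_neg]
      rintro ⟨h1, -⟩
      simp only [List.length_cons] at h1
      omega
    rw [hc]
    simp only [ne_eq, decide_not]
    rw [hf]
    by_cases ha : a = 0 <;> simp [ha, hf, countAdj]
  · have e : 0 + leadZeros q + 1 = leadZeros q + 1 := by omega
    have hc : contrib (a :: q) 0 = if a * h < 0 then 1 else 0 := by
      simp only [contrib, List.drop_succ_cons, List.drop_zero, e, List.length_cons,
        List.getD_cons_zero, List.getD_cons_succ, Nat.add_lt_add_iff_right, hg]
      simp [hl]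
    rw [hc]
    simp only [ne_eq, decide_not]
    rw [hf]
    by_cases ha : a = 0
    · subst ha
      have hne : ¬ ((0 : Int) * h < 0) := by simp
      simp [hf]
    · have hfa : (a :: q).filter (fun x => !decide (x = 0)) = a :: h :: r := by
        simp [ha, hf]
      rw [hfa, countAdj]

lemma main_sum (p : List Int) :
    ((List.range (p.length - 1)).map (contrib p)).sum = countAdj (p.filter (fun x => x ≠ 0)) := by
  induction p with
  | nil => simp [countAdj]
  | cons a q ih =>
    cases q with
    | nil =>
      have h1 : ∀ x : Int, countAdj [x] = 0 := fun x => rfl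
      have h0 : countAdj [] = 0 := rfl
      by_cases ha : a = 0 <;> simp [ha, h1, h0]
    | cons b t =>
      have hlen : (a :: b :: t).length - 1 = t.length + 1 := by simp
      rw [hlen, List.range_succ_eq_map, List.map_cons, List.sum_cons, List.map_map]
      have hshift : (List.range t.length).map (contrib (a :: b :: t) ∘ Nat.succ) =
          (List.range t.length).map (contrib (b :: t)) := by
        apply List.map_congr_left
        intro i _
        exact contrib_shift a (b :: t) i
      rw [hshift]
      have hlen2 : (b :: t).length - 1 = t.length := by simp
      rw [hlen2] at ih
      rw [ih]
      exact head_step a (b :: t)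

-- ===== VERDICT (by name: the statement is the Claim_ definition above) =====
theorem cambios_signo_spec : Claim_equal_cambios_signo := by
  intro p _
  unfold Spec_cambios_signo cambios_signo cambios_signo_alt
  rw [foldl_count, main_sum]
  simp
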